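-- pv_equiv track=rewrite | github.com/Ignat2003/aois | aois_laba2/aois_laba2.py | print_disjunctive_index_form
-- ===== SOURCE A (Python) =====
-- def print_disjunctive_index_form(truth_table_answer: dict):
--     degree = len(truth_table_answer)
--     weights = []
--     for variant, mean in truth_table_answer.items():
--         if mean == 1:
--             weights.append(2 ** degree)
--         degree -= 1
--     return sum(weights)
-- ===== SOURCE B (Python) =====
-- def print_disjunctive_index_form(truth_table_answer: dict):
--     acc = 0
--     for mean in truth_table_answer.values():
--         acc = acc * 2 + (1 if mean == 1 else 0)
--     return acc * 2
-- ===== Notes on version B (the rewrite author's own statement) =====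
-- stated objective: faster
-- what changed: Replaces the weights-list construction (append 2**degree per true row, then sum) with a single Horner-style fold acc = acc*2 + bit over the column, returning acc*2; no per-row big-power computations and no intermediate list.
import Mathlib
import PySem

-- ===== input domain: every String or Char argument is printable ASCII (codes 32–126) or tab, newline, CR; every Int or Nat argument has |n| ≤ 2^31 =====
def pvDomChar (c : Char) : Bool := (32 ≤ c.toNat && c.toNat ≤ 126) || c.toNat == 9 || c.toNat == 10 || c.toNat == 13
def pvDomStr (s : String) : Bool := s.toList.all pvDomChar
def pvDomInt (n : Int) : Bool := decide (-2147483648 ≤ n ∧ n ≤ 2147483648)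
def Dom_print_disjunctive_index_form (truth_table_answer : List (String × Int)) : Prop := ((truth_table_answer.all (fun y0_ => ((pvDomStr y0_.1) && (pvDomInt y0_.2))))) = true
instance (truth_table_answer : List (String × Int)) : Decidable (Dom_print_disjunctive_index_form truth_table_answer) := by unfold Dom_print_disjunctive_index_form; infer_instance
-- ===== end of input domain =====

-- ===== PORT A =====
-- port of A: fold keeps (degree, weights); each true row appends 2**degree, degree decrements each row; return sum
def print_disjunctive_index_form (truth_table_answer : List (String × Int)) : Int :=
  let init : Int × List Int := ((truth_table_answer.length : Int), [])
  let res := truth_table_answer.foldl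
    (fun st p => (st.1 - 1, if p.2 = 1 then st.2 ++ [(2 : Int) ^ st.1.toNat] else st.2)) init
  res.2.sum

-- ===== PORT B =====
-- port of B: Horner fold acc = acc*2 + bit over the column, result times 2
def print_disjunctive_index_form_alt (truth_table_answer : List (String × Int)) : Int :=
  (truth_table_answer.foldl (fun acc p => acc * 2 + (if p.2 = 1 then 1 else 0)) 0) * 2

-- ===== PRECONDITION & SPEC =====
def Spec_print_disjunctive_index_form (truth_table_answer : List (String × Int)) (out : Int) : Prop := out = print_disjunctive_index_form_alt truth_table_answer
instance (truth_table_answer : List (String × Int)) (out : Int) : Decidable (Spec_print_disjunctive_index_form truth_table_answer out) := by unfold Spec_print_disjunctive_index_form; infer_instance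

-- ===== CLAIM (what is proved, stated in full; the proofs are below) =====
def Claim_equal_print_disjunctive_index_form : Prop := ∀ (truth_table_answer : List (String × Int)), Dom_print_disjunctive_index_form truth_table_answer → Spec_print_disjunctive_index_form truth_table_answer (print_disjunctive_index_form truth_table_answer)

-- ===== LEMMAS AND PROOFS =====

-- g l d: value of A's weights sum when the remaining rows are l and the current degree is d
def pvG (l : List (String × Int)) (d : Int) : Int :=
  match l with
  | [] => 0
  | p :: t => (if p.2 = 1 then (2 : Int) ^ d.toNat else 0) + pvG t (d - 1)

theorem pvA_foldl_sum (l : List (String × Int)) (d : Int) (ws : List Int) :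
    (l.foldl (fun st p => (st.1 - 1, if p.2 = 1 then st.2 ++ [(2 : Int) ^ st.1.toNat] else st.2))
      (d, ws)).2.sum = ws.sum + pvG l d := by
  induction l generalizing d ws with
  | nil => simp [pvG]
  | cons p t ih =>
    simp only [List.foldl_cons, pvG]
    rw [ih]
    split_ifs <;> simp [add_assoc]

theorem pvB_foldl_linear (l : List (String × Int)) (a : Int) :
    l.foldl (fun acc p => acc * 2 + (if p.2 = 1 then 1 else 0)) a
      = a * 2 ^ l.length + l.foldl (fun acc p => acc * 2 + (if p.2 = 1 then 1 else 0)) 0 := by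
  induction l generalizing a with
  | nil => simp
  | cons p t ih =>
    simp only [List.foldl_cons, List.length_cons]
    rw [ih, ih (0 * 2 + _)]
    ring

theorem pvG_eq (l : List (String × Int)) (k : Nat) :
    pvG l ((l.length + k : Nat) : Int)
      = (l.foldl (fun acc p => acc * 2 + (if p.2 = 1 then 1 else 0)) 0) * 2 ^ (k + 1) := by
  induction l generalizing k with
  | nil => simp [pvG]
  | cons p t ih =>
    simp only [pvG, List.length_cons, List.foldl_cons]
    have h1 : ((t.length + 1 + k : Nat) : Int) - 1 = ((t.length + k : Nat) : Int) := by push_cast; ring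
    have h2 : ((t.length + 1 + k : Nat) : Int).toNat = t.length + 1 + k := by omega
    rw [h1, ih, h2, pvB_foldl_linear t (0 * 2 + if p.2 = 1 then 1 else 0)]
    split_ifs <;> simp <;> ring

-- ===== VERDICT (by name: the statement is the Claim_ definition above) =====
theorem print_disjunctive_index_form_spec : Claim_equal_print_disjunctive_index_form := by
  intro l _
  unfold Spec_print_disjunctive_index_form print_disjunctive_index_form print_disjunctive_index_form_alt
  simp only [pvA_foldl_sum, List.sum_nil, zero_add]
  have := pvG_eq l 0
  simpa using this
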